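-- pv_equiv track=rewrite | github.com/franckdura/Bwifsttar-library | workspace/Bwifsttar/Previous_files/interpolation_LI.py | sort_trucks_speeds
-- ===== SOURCE A (Python) =====
-- def sort_trucks_speeds(trucks):
--     idx_70 = [0,2,5,7]
--     idx_90 = [1,4,8,9,10,11]
--     idx_80 = [3,6]
--     trucks70 = []
--     for i in range(len(trucks)):
--         if i in idx_70:
--             trucks70.append(trucks[i])
--     trucks80 = []
--     for i in range(len(trucks)):
--         if i in idx_80:
--             trucks80.append(trucks[i])
--
--     trucks90 = []
--     for i in range(len(trucks)):
--         if i in idx_90: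
--             trucks90.append(trucks[i])
--
--
--     return trucks70,trucks80,trucks90
-- ===== SOURCE B (Python) =====
-- def sort_trucks_speeds(trucks):
--     n = len(trucks)
--
--     def gather(idx):
--         return [trucks[i] for i in idx if i < n]
--
--     return gather([0, 2, 5, 7]), gather([3, 6]), gather([1, 4, 8, 9, 10, 11])
-- ===== Notes on version B (the rewrite author's own statement) =====
-- stated objective: simpler
-- what changed: Instead of three full scans over range(len(trucks)) with a membership test against the index lists, B gathers directly over each fixed (sorted) index list with an i < len(trucks) guard.
import Mathlib
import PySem

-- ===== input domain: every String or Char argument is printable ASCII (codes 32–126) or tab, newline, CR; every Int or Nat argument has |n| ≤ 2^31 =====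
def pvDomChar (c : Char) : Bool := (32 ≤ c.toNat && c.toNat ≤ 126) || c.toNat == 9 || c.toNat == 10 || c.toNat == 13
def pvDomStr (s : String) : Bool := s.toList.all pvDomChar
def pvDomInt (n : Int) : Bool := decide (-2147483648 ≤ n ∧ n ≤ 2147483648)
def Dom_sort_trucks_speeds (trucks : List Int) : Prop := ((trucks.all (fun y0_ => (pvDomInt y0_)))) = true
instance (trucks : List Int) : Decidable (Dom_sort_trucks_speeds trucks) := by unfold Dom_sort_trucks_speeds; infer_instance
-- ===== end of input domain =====

-- B replaces A's three full scans of range(len(trucks)) by a direct gather over each fixed sorted index list (simpler, and O(1) in len(trucks)).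

-- ===== PORT A =====
def sort_trucks_speeds (trucks : List Int) : List Int × List Int × List Int :=
  let idx_70 : List Int := [0, 2, 5, 7]
  let idx_90 : List Int := [1, 4, 8, 9, 10, 11]
  let idx_80 : List Int := [3, 6]
  -- i is always a valid index (i ∈ range(len)), so pyGetD with default 0 is exact
  let trucks70 := (PySem.List.pyRange 0 (trucks.length : Int) 1).foldl
    (fun acc i => if i ∈ idx_70 then acc ++ [PySem.List.pyGetD trucks i 0] else acc) []
  let trucks80 := (PySem.List.pyRange 0 (trucks.length : Int) 1).foldl
    (fun acc i => if i ∈ idx_80 then acc ++ [PySem.List.pyGetD trucks i 0] else acc) []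
  let trucks90 := (PySem.List.pyRange 0 (trucks.length : Int) 1).foldl
    (fun acc i => if i ∈ idx_90 then acc ++ [PySem.List.pyGetD trucks i 0] else acc) []
  (trucks70, trucks80, trucks90)

-- ===== PORT B =====
def pvGather (trucks : List Int) (idx : List Int) : List Int :=
  (idx.filter (fun i => i < (trucks.length : Int))).map (fun i => PySem.List.pyGetD trucks i 0)

def sort_trucks_speeds_alt (trucks : List Int) : List Int × List Int × List Int :=
  (pvGather trucks [0, 2, 5, 7], pvGather trucks [3, 6], pvGather trucks [1, 4, 8, 9, 10, 11])

-- ===== PRECONDITION & SPEC =====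
def Spec_sort_trucks_speeds (trucks : List Int) (out : List Int × List Int × List Int) : Prop := out = sort_trucks_speeds_alt trucks
instance (trucks : List Int) (out : List Int × List Int × List Int) : Decidable (Spec_sort_trucks_speeds trucks out) := by unfold Spec_sort_trucks_speeds; infer_instance

-- ===== CLAIM (what is proved, stated in full; the proofs are below) =====
def Claim_equal_sort_trucks_speeds : Prop := ∀ (trucks : List Int), Dom_sort_trucks_speeds trucks → Spec_sort_trucks_speeds trucks (sort_trucks_speeds trucks)

-- ===== LEMMAS AND PROOFS =====

-- two strictly increasing lists with the same members are equal
lemma eq_of_pairwise_lt_of_mem_iff (l1 l2 : List Int)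
    (h1 : l1.Pairwise (· < ·)) (h2 : l2.Pairwise (· < ·))
    (hm : ∀ a, a ∈ l1 ↔ a ∈ l2) : l1 = l2 := by
  have p : l1.Perm l2 :=
    (List.perm_ext_iff_of_nodup h1.nodup h2.nodup).mpr hm
  exact p.eq_of_pairwise (fun a b ha hb hab hba => le_antisymm hab hba)
    (List.Pairwise.imp le_of_lt h1) (List.Pairwise.imp le_of_lt h2)

-- A's scan-and-test loop over range(len) equals B's direct gather over the sorted index list
lemma scan_eq_gather (trucks : List Int) (idx : List Int)
    (hs : idx.Pairwise (· < ·)) (hnn : ∀ i ∈ idx, 0 ≤ i) :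
    (PySem.List.pyRange 0 (trucks.length : Int) 1).foldl
      (fun acc i => if i ∈ idx then acc ++ [PySem.List.pyGetD trucks i 0] else acc) []
    = pvGather trucks idx := by
  rw [show (fun (acc : List Int) (i : Int) =>
        if i ∈ idx then acc ++ [PySem.List.pyGetD trucks i 0] else acc)
      = (fun acc i => if decide (i ∈ idx) = true
          then acc ++ [PySem.List.pyGetD trucks i 0] else acc) from by
    funext acc i; simp]
  rw [PySem.List.foldl_append_if]
  unfold pvGather
  rw [List.nil_append]
  congr 1
  apply eq_of_pairwise_lt_of_mem_iff
  · exact List.Pairwise.sublist List.filter_sublist (PySem.List.pairwise_lt_pyRange_one _ _)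
  · exact List.Pairwise.sublist List.filter_sublist hs
  · intro a
    simp only [List.mem_filter, PySem.List.mem_pyRange_one, decide_eq_true_eq]
    constructor
    · rintro ⟨⟨_, hlt⟩, hmem⟩; exact ⟨hmem, hlt⟩
    · rintro ⟨hmem, hlt⟩; exact ⟨⟨hnn a hmem, hlt⟩, hmem⟩

-- ===== VERDICT (by name: the statement is the Claim_ definition above) =====
theorem sort_trucks_speeds_spec : Claim_equal_sort_trucks_speeds := by
  intro trucks _
  show _ = _
  unfold sort_trucks_speeds sort_trucks_speeds_alt
  refine Prod.ext ?_ (Prod.ext ?_ ?_) <;> simp only <;>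
    exact scan_eq_gather trucks _ (by decide) (by decide)
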